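-- pv_equiv track=rewrite | github.com/sidhikabalachandar/lig_clash_score | src/sample/train/search_test.py | group_grid
-- ===== SOURCE A (Python) =====
-- def group_grid(n, grid_size):
--     grid = []
--     for dx in range(-grid_size, grid_size + 1):
--         for dy in range(-grid_size, grid_size + 1):
--             for dz in range(-grid_size, grid_size + 1):
--                 grid.append([dx, dy, dz])
--
--     grouped_files = []
--
--     for i in range(0, len(grid), n):
--         grouped_files += [grid[i: i + n]]
--
--     return grouped_files
-- ===== SOURCE B (Python) =====
-- def group_grid(n, grid_size):
--     side = 2 * grid_size + 1
--     total = max(0, side) ** 3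
--
--     def decode(j):
--         q1, r_dz = divmod(j, side)
--         dx_i, dy_i = divmod(q1, side)
--         return [dx_i - grid_size, dy_i - grid_size, r_dz - grid_size]
--
--     return [[decode(j) for j in range(i, min(i + n, total))]
--             for i in range(0, total, n)]
-- ===== Notes on version B (the rewrite author's own statement) =====
-- stated objective: faster
-- what changed: B never materialises the flat grid list: each coordinate triple is decoded arithmetically from its flat index by two divmods, and chunks are produced directly from index ranges instead of slicing a prebuilt list.
import Mathlib
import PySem

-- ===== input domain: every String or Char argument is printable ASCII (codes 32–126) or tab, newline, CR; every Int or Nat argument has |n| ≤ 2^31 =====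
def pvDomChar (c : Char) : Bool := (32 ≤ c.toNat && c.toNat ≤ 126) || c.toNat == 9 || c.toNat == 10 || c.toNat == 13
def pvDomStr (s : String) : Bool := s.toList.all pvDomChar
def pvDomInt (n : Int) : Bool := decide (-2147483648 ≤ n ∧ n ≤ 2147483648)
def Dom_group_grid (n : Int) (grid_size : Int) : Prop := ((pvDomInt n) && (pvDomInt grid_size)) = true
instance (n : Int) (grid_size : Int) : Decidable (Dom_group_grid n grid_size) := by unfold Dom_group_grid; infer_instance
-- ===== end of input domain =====

-- B skips A's materialised flat grid list: it decodes each coordinate triple arithmetically from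
-- its flat index (two divmods by side) and emits each chunk directly from its index range.

-- ===== PORT A =====
-- The Python list is modelled by Array (O(1) append, as in CPython); grid[i:i+n] with the
-- 0 <= i, 0 <= i+n bounds produced by range(0, len, n) is Array.extract i.toNat (i+n).toNat,
-- which clamps past-the-end exactly as the Python slice does there.
def group_grid (n : Int) (grid_size : Int) : List (List (List Int)) :=
  let grid : Array (List Int) :=
    (PySem.List.pyRange (-grid_size) (grid_size + 1) 1).foldl (fun acc dx =>
      (PySem.List.pyRange (-grid_size) (grid_size + 1) 1).foldl (fun acc dy =>
        (PySem.List.pyRange (-grid_size) (grid_size + 1) 1).foldl (fun acc dz =>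
          acc.push [dx, dy, dz]) acc) acc) #[]
  ((PySem.List.pyRange 0 (grid.size : Int) n).foldl (fun acc i =>
    acc.push (grid.extract i.toNat (i + n).toNat).toList) #[]).toList

-- ===== PORT B =====
-- decode(j): recover [dx, dy, dz] from the flat index j by two successive divmods by side
def pvDecode (grid_size j : Int) : List Int :=
  let side := 2 * grid_size + 1
  let q1 := PySem.Int.floordiv j side
  let r_dz := PySem.Int.mod j side
  let dx_i := PySem.Int.floordiv q1 side
  let dy_i := PySem.Int.mod q1 side
  [dx_i - grid_size, dy_i - grid_size, r_dz - grid_size]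

def group_grid_alt (n : Int) (grid_size : Int) : List (List (List Int)) :=
  let side := 2 * grid_size + 1
  let total := (max 0 side) ^ 3
  (PySem.List.pyRange 0 total n).map (fun i =>
    (PySem.List.pyRange i (min (i + n) total) 1).map (pvDecode grid_size))

-- ===== PRECONDITION & SPEC =====
-- Pre_ excludes exactly n = 0, where Python's range(0, len(grid), 0) raises ValueError (in A and in B alike).
def Pre_group_grid (n : Int) (grid_size : Int) : Prop := n ≠ 0
instance (n : Int) (grid_size : Int) : Decidable (Pre_group_grid n grid_size) := by unfold Pre_group_grid; infer_instance
def pvWitness_group_grid : Int × Int := (2, 1)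

def Spec_group_grid (n : Int) (grid_size : Int) (out : List (List (List Int))) : Prop := out = group_grid_alt n grid_size
instance (n : Int) (grid_size : Int) (out : List (List (List Int))) : Decidable (Spec_group_grid n grid_size out) := by unfold Spec_group_grid; infer_instance

-- ===== CLAIM (what is proved, stated in full; the proofs are below) =====
def Claim_equal_group_grid : Prop := ∀ (n : Int) (grid_size : Int), Dom_group_grid n grid_size → Pre_group_grid n grid_size → Spec_group_grid n grid_size (group_grid n grid_size)

-- ===== LEMMAS AND PROOFS =====

-- flattening one level of nested iteration over Nat ranges into a single indexed range
theorem pv_flat2 {β : Type} (a b : Nat) (f : Nat → Nat → β) :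
    (List.range a).flatMap (fun x => (List.range b).map (f x)) =
    (List.range (a * b)).map (fun j => f (j / b) (j % b)) := by
  induction a with
  | zero => simp
  | succ a ih =>
    rw [List.range_succ, List.flatMap_append, ih, Nat.succ_mul, List.range_add,
        List.map_append, List.map_map]
    congr 1
    · simp only [List.flatMap_cons, List.flatMap_nil, List.append_nil]
      apply List.map_congr_left
      intro k hk
      rw [List.mem_range] at hk
      have h1 : (a * b + k) / b = a := by
        rcases Nat.eq_zero_or_pos b with hb | hb
        · omega
        · rw [Nat.mul_comm a b, Nat.mul_add_div hb, Nat.div_eq_of_lt hk]; omega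
      have h2 : (a * b + k) % b = k := by
        rw [Nat.mul_comm, Nat.mul_add_mod, Nat.mod_eq_of_lt hk]
      simp [h1, h2]

-- a push-accumulating fold of mapped elements, seen through toList, is an append of a map
theorem pv_push_map {α β : Type} (l : List α) (f : α → β) (acc : Array β) :
    (l.foldl (fun acc x => acc.push (f x)) acc).toList = acc.toList ++ l.map f := by
  induction l generalizing acc with
  | nil => simp
  | cons x xs ih => simp

-- a push-accumulating fold whose step appends h x, seen through toList, is an append of a flatMap
theorem pv_push_fold {α β : Type} (l : List α) (step : Array β → α → Array β)
    (h : α → List β) (hstep : ∀ acc x, (step acc x).toList = acc.toList ++ h x)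
    (acc : Array β) :
    (l.foldl step acc).toList = acc.toList ++ l.flatMap h := by
  induction l generalizing acc with
  | nil => simp
  | cons x xs ih => simp [ih, hstep, List.flatMap_cons]

-- A's triple nested loop builds exactly the index-decoded list of B
theorem pv_grid_eq (g : Int) :
    ((PySem.List.pyRange (-g) (g + 1) 1).foldl (fun acc dx =>
      (PySem.List.pyRange (-g) (g + 1) 1).foldl (fun acc dy =>
        (PySem.List.pyRange (-g) (g + 1) 1).foldl (fun acc dz =>
          acc.push [dx, dy, dz]) acc) acc) #[]).toList =
    (PySem.List.pyRange 0 ((max 0 (2 * g + 1)) ^ 3) 1).map (pvDecode g) := by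
  rw [pv_push_fold _ _ (fun dx => (PySem.List.pyRange (-g) (g + 1) 1).flatMap (fun dy =>
        (PySem.List.pyRange (-g) (g + 1) 1).map (fun dz => [dx, dy, dz])))
      (fun acc dx =>
        pv_push_fold _ _ (fun dy => (PySem.List.pyRange (-g) (g + 1) 1).map
            (fun dz => [dx, dy, dz]))
          (fun acc dy => pv_push_map _ _ _) acc)]
  simp only [List.nil_append]
  rcases Int.lt_or_le g 0 with hg | hg
  · have h1 : PySem.List.pyRange (-g) (g + 1) 1 = [] :=
      PySem.List.pyRange_one_eq_nil (by omega)
    have h2 : (max 0 (2 * g + 1) : Int) = 0 := by omega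
    simp [h1, h2]
  · set s : Nat := (2 * g + 1).toNat with hs
    have hside : (2 * g + 1 : Int) = (s : Int) := by omega
    have hmax : (max 0 (2 * g + 1) : Int) = (s : Int) := by omega
    have h1 : (g + 1 - -g).toNat = s := by omega
    rw [PySem.List.pyRange_one (-g) (g + 1), h1, PySem.List.pyRange_one 0 _]
    have htot : (((max 0 (2 * g + 1) : Int)) ^ 3 - 0).toNat = s * (s * s) := by
      rw [hmax]; push_cast [sub_zero]
      rw [show ((s : Int) ^ 3) = ((s * (s * s) : Nat) : Int) by push_cast; ring]
      exact Int.toNat_natCast _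
    rw [htot]
    simp only [List.flatMap_map, List.map_map]
    simp only [Function.comp_def]
    simp only [pv_flat2]
    apply List.map_congr_left
    intro k hk
    rw [List.mem_range] at hk
    simp only [pvDecode, zero_add]
    rw [hside, PySem.Int.floordiv_natCast, PySem.Int.mod_natCast,
      PySem.Int.floordiv_natCast, PySem.Int.mod_natCast]
    have e1 : k / (s * s) = k / s / s := (Nat.div_div_eq_div_mul k s s).symm
    have e2 : k % (s * s) / s = k / s % s := Nat.mod_mul_right_div_self k s s
    have e3 : k % (s * s) % s = k % s := Nat.mod_mod_of_dvd k ⟨s, rfl⟩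
    rw [e1, e2, e3]
    simp only [List.cons.injEq, and_true]
    refine ⟨by ring, by ring, by ring⟩

-- slicing B's decoded range list is the same as decoding the sliced index range
theorem pv_chunk (d : Int → List Int) (T i n : Int) (hT : 0 ≤ T) (hi : 0 ≤ i)
    (hiT : i < T) (hn : 0 < n) :
    PySem.List.slice ((PySem.List.pyRange 0 T 1).map d) (some i) (some (i + n)) =
    (PySem.List.pyRange i (min (i + n) T) 1).map d := by
  rw [PySem.List.slice_toNat _ hi (by omega)]
  rw [PySem.List.pyRange_one_append 0 i T hi (le_of_lt hiT)]
  rw [List.map_append,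
    List.drop_left' (by simp [PySem.List.length_pyRange_one])]
  by_cases hc : i + n ≤ T
  · rw [min_eq_left hc]
    rw [PySem.List.pyRange_one_append i (i + n) T (by omega) hc, List.map_append]
    exact List.take_left' (by simp [PySem.List.length_pyRange_one]; omega)
  · rw [min_eq_right (by omega)]
    apply List.take_of_length_le
    simp [PySem.List.length_pyRange_one]; omega

-- A's chunking loop over any array whose contents are B's decoded list produces B's result
theorem pv_outer (n g : Int) (hn : n ≠ 0) (G : Array (List Int))
    (hG : G.toList = (PySem.List.pyRange 0 ((max 0 (2 * g + 1)) ^ 3) 1).map (pvDecode g)) :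
    ((PySem.List.pyRange 0 (G.size : Int) n).foldl (fun acc i =>
      acc.push (G.extract i.toNat (i + n).toNat).toList) #[]).toList =
    group_grid_alt n g := by
  have hT : (0 : Int) ≤ (max 0 (2 * g + 1)) ^ 3 := pow_nonneg (le_max_left 0 _) 3
  have hsize : ((G.size : Nat) : Int) = (max 0 (2 * g + 1)) ^ 3 := by
    rw [← Array.length_toList, hG]
    simp [PySem.List.length_pyRange_one]
  rw [pv_push_map _ _ _, Array.toList_empty, List.nil_append, hsize]
  unfold group_grid_alt
  apply List.map_congr_left
  intro i hi
  rcases lt_trichotomy n 0 with hneg | hz | hpos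
  · rw [PySem.List.pyRange_of_neg 0 _ hneg] at hi
    rw [if_neg (by omega)] at hi
    simp at hi
  · exact absurd hz hn
  · rw [PySem.List.mem_pyRange_iff_of_pos hpos] at hi
    have hchunk := pv_chunk (pvDecode g) _ i n hT hi.1 hi.2.1 hpos
    rw [PySem.List.slice_toNat _ hi.1 (by omega)] at hchunk
    rw [Array.toList_extract, List.extract_eq_take_drop, hG]
    exact hchunk

theorem group_grid_spec : Claim_equal_group_grid := by
  intro n g _ hn
  show group_grid n g = group_grid_alt n g
  exact pv_outer n g hn _ (pv_grid_eq g)
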